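-- pv_equiv track=rewrite | github.com/vdaysky-at-znu/lab6 | main.py | gather_pair
-- ===== SOURCE A (Python) =====
-- def gather_pair(distance_mx, ignore=None):
--     min_x = min_y = min_v = None
--
--     for x, col in enumerate(distance_mx):
--         c_min = min([x for x in col if x != 0])
--
--         if min_v is not None and c_min >= min_v:
--             continue
--
--         if ignore and (x, col.index(c_min)) in ignore:
--             continue
--
--         min_x = x
--         min_y = col.index(c_min)
--         min_v = c_min
--
--     return (min_x, min_y), min_v
-- ===== SOURCE B (Python) =====
-- def gather_pair(distance_mx, ignore=None):
--     # pass 1: per-row minimal nonzero entry with its first column index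
--     entries = []
--     for x, col in enumerate(distance_mx):
--         c_min = min([v for v in col if v != 0])
--         entries.append((x, col.index(c_min), c_min))
--     # pass 2: drop ignored cells, then take the first entry with minimal value
--     candidates = [e for e in entries if not (ignore and (e[0], e[1]) in ignore)]
--     if not candidates:
--         return (None, None), None
--     best = min(candidates, key=lambda e: e[2])
--     return (best[0], best[1]), best[2]
-- ===== Notes on version B (the rewrite author's own statement) =====
-- stated objective: alternative
-- what changed: A's single loop with a running (min_x,min_y,min_v) state and continue-based skipping is replaced by two passes: collect one (row, first-min-index, min-value) entry per row, filter out ignored entries, then pick the first value-minimal candidate with min(key=...).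
-- outside the precondition, e.g. on gather_pair([[0, 5]], [(0, 1)]): A returns ((None, None), None), B returns ((None, None), None)
import Mathlib
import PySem

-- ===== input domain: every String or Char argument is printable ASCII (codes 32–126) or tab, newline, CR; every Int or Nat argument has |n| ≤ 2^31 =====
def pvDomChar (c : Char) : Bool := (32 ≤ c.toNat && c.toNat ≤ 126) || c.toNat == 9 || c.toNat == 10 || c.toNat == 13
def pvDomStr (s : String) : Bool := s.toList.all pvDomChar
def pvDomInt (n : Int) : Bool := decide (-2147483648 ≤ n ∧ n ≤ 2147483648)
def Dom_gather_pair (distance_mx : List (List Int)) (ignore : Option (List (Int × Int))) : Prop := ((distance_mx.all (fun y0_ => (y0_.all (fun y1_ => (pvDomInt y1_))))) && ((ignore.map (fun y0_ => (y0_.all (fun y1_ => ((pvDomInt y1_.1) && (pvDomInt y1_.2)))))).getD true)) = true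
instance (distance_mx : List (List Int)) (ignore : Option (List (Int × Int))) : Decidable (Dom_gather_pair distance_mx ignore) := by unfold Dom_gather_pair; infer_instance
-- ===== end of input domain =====

-- B restructures A's single running-min loop into two passes (collect per-row entries, then
-- filter the ignored ones and take the first value-minimal candidate); objective: alternative
-- decomposition, same behaviour and cost.

-- shared small helpers (both Python versions compute these subexpressions identically)
-- min([v for v in col if v != 0]) : none = ValueError on a row without nonzero entries
def pvCMin? (col : List Int) : Option Int :=
  PySem.List.min? (col.filter (fun v => decide (v ≠ 0))) (fun y => y)

-- col.index(v); only ever used with v ∈ col, so the none branch is unreachable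
def pvIdx (col : List Int) (v : Int) : Int :=
  match PySem.List.index? col v with
  | some k => (k : Int)
  | none => 0

-- Python truthiness test 'ignore and p in ignore'
def pvIgnored (ignore : Option (List (Int × Int))) (p : Int × Int) : Bool :=
  match ignore with
  | some l => decide (l ≠ []) && decide (p ∈ l)
  | none => false

-- ===== PORT A =====
-- state: (min_x, min_y, min_v), each None-able; outer Option = ValueError already raised.
-- Outside Pre_ the Python raises ValueError or returns ((None, None), None); the port
-- renders both as ((0, 0), 0) there (nothing is claimed outside Pre_).
def gather_pair (distance_mx : List (List Int)) (ignore : Option (List (Int × Int))) : (Int × Int) × Int :=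
  let r := (PySem.List.enumerate distance_mx 0).foldl
    (fun st (p : Int × List Int) =>
      match st with
      | none => none
      | some (min_x, min_y, min_v) =>
        match pvCMin? p.2 with
        | none => none
        | some c_min =>
          if (match min_v with | some v => decide (v ≤ c_min) | none => false) then
            some (min_x, min_y, min_v)
          else if pvIgnored ignore (p.1, pvIdx p.2 c_min) then
            some (min_x, min_y, min_v)
          else
            some (some p.1, some (pvIdx p.2 c_min), some c_min))
    (some (none, none, none) : Option (Option Int × Option Int × Option Int))
  match r with
  | some (some mx, some my, some mv) => ((mx, my), mv)
  | _ => ((0, 0), 0)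

-- ===== PORT B =====
-- pass 1 builds entries (outer Option = ValueError), pass 2 filters and takes the first
-- value-minimal candidate (Python's min(candidates, key=lambda e: e[2]) = PySem.List.min?).
-- The ValueError and empty-candidates cases render as ((0, 0), 0), outside Pre_.
def gather_pair_alt (distance_mx : List (List Int)) (ignore : Option (List (Int × Int))) : (Int × Int) × Int :=
  let entries := (PySem.List.enumerate distance_mx 0).foldl
    (fun acc (p : Int × List Int) =>
      match acc with
      | none => none
      | some es =>
        match pvCMin? p.2 with
        | none => none
        | some c_min => some (es ++ [(p.1, pvIdx p.2 c_min, c_min)]))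
    (some ([] : List (Int × Int × Int)))
  match entries with
  | none => ((0, 0), 0)
  | some es =>
    let candidates := es.filter (fun e => !pvIgnored ignore (e.1, e.2.1))
    match PySem.List.min? candidates (fun e => e.2.2) with
    | none => ((0, 0), 0)
    | some best => ((best.1, best.2.1), best.2.2)

-- ===== PRECONDITION & SPEC =====
-- Pre_ excludes (a) inputs where some row has no nonzero entry: Python A raises ValueError
-- there; and (b) inputs where every row's minimal cell is ignored: there A returns
-- ((None, None), None), which is not a value of the declared (int,int),int type (B returns
-- the same None triple).
def Pre_gather_pair (distance_mx : List (List Int)) (ignore : Option (List (Int × Int))) : Prop :=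
  (∀ col ∈ distance_mx, ∃ v ∈ col, v ≠ 0) ∧
  (∃ p ∈ PySem.List.enumerate distance_mx 0,
    pvIgnored ignore (p.1, pvIdx p.2 ((pvCMin? p.2).getD 0)) = false)

instance (distance_mx : List (List Int)) (ignore : Option (List (Int × Int))) : Decidable (Pre_gather_pair distance_mx ignore) := by unfold Pre_gather_pair; infer_instance

def pvWitness_gather_pair : List (List Int) × (Option (List (Int × Int))) := ([[0, 1], [2, 0]], none)

def Spec_gather_pair (distance_mx : List (List Int)) (ignore : Option (List (Int × Int))) (out : (Int × Int) × Int) : Prop := out = gather_pair_alt distance_mx ignore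
instance (distance_mx : List (List Int)) (ignore : Option (List (Int × Int))) (out : (Int × Int) × Int) : Decidable (Spec_gather_pair distance_mx ignore out) := by unfold Spec_gather_pair; infer_instance

-- ===== CLAIM (what is proved, stated in full; the proofs are below) =====
def Claim_equal_gather_pair : Prop := ∀ (distance_mx : List (List Int)) (ignore : Option (List (Int × Int))), Dom_gather_pair distance_mx ignore → Pre_gather_pair distance_mx ignore → Spec_gather_pair distance_mx ignore (gather_pair distance_mx ignore)

-- ===== LEMMAS AND PROOFS =====

-- per-row entries with their starting index; none = some row raises ValueError
def pvRowsEntries? : List (List Int) → Int → Option (List (Int × Int × Int))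
  | [], _ => some []
  | col :: rs, i =>
    match pvCMin? col with
    | none => none
    | some m => (pvRowsEntries? rs (i + 1)).map (fun es => (i, pvIdx col m, m) :: es)

-- A's loop state as the image of an optional best entry
def pvEnc (o : Option (Int × Int × Int)) : Option Int × Option Int × Option Int :=
  match o with
  | none => (none, none, none)
  | some e => (some e.1, some e.2.1, some e.2.2)

-- the fold body of min? with key (·.2.2)
-- upd body shared by min? and the running-min characterisation
def pvUpd (acc : Option (Int × Int × Int)) (e : Int × Int × Int) : Option (Int × Int × Int) :=
  match acc with
  | none => some e
  | some m => if e.2.2 < m.2.2 then some e else some m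

theorem pvFoldA_none (ignore : Option (List (Int × Int))) (l : List (Int × List Int)) :
    l.foldl
      (fun st (p : Int × List Int) =>
        match st with
        | none => none
        | some (min_x, min_y, min_v) =>
          match pvCMin? p.2 with
          | none => none
          | some c_min =>
            if (match min_v with | some v => decide (v ≤ c_min) | none => false) then
              some (min_x, min_y, min_v)
            else if pvIgnored ignore (p.1, pvIdx p.2 c_min) then
              some (min_x, min_y, min_v)
            else
              some (some p.1, some (pvIdx p.2 c_min), some c_min))
      (none : Option (Option Int × Option Int × Option Int)) = none := by
  induction l with
  | nil => rfl
  | cons p t ih => simpa using ih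

theorem pvFoldA_eq (ignore : Option (List (Int × Int))) (rows : List (List Int)) :
    ∀ (i : Int) (acc : Option (Int × Int × Int)),
    (PySem.List.enumerate rows i).foldl
      (fun st (p : Int × List Int) =>
        match st with
        | none => none
        | some (min_x, min_y, min_v) =>
          match pvCMin? p.2 with
          | none => none
          | some c_min =>
            if (match min_v with | some v => decide (v ≤ c_min) | none => false) then
              some (min_x, min_y, min_v)
            else if pvIgnored ignore (p.1, pvIdx p.2 c_min) then
              some (min_x, min_y, min_v)
            else
              some (some p.1, some (pvIdx p.2 c_min), some c_min))
      (some (pvEnc acc))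
    = (pvRowsEntries? rows i).map
        (fun es => pvEnc ((es.filter (fun e => !pvIgnored ignore (e.1, e.2.1))).foldl pvUpd acc)) := by
  induction rows with
  | nil => intro i acc; rfl
  | cons col rs ih =>
    intro i acc
    rw [PySem.List.enumerate_cons, List.foldl_cons]
    cases hm : pvCMin? col with
    | none =>
      simp [hm, pvRowsEntries?, pvFoldA_none]
    | some m =>
      have hstep :
          (match pvEnc acc with
            | (min_x, min_y, min_v) =>
              if (match min_v with | some v => decide (v ≤ m) | none => false) then
                some (min_x, min_y, min_v)
              else if pvIgnored ignore (i, pvIdx col m) then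
                some (min_x, min_y, min_v)
              else
                some (some i, some (pvIdx col m), some m))
          = some (pvEnc (if pvIgnored ignore (i, pvIdx col m) then acc
                         else pvUpd acc (i, pvIdx col m, m))) := by
        cases acc with
        | none =>
          cases pvIgnored ignore (i, pvIdx col m) <;> simp [pvEnc, pvUpd]
        | some b =>
          cases pvIgnored ignore (i, pvIdx col m) <;>
            simp only [pvEnc, pvUpd] <;>
              split_ifs <;> simp_all [pvEnc] <;> omega
      simp only [hm, hstep, ih (i + 1), pvRowsEntries?, Option.map_map]
      cases pvRowsEntries? rs (i + 1) with
      | none => rfl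
      | some es =>
        simp only [Option.map_some, Function.comp]
        congr 1
        by_cases hig : pvIgnored ignore (i, pvIdx col m) = true
        · simp [hig]
        · simp only [Bool.not_eq_true] at hig
          simp [hig]

theorem pvEntries_eq (ignore : Option (List (Int × Int))) (rows : List (List Int)) :
    ∀ (i : Int) (es0 : List (Int × Int × Int)),
    (PySem.List.enumerate rows i).foldl
      (fun acc (p : Int × List Int) =>
        match acc with
        | none => none
        | some es =>
          match pvCMin? p.2 with
          | none => none
          | some c_min => some (es ++ [(p.1, pvIdx p.2 c_min, c_min)]))
      (some es0)
    = (pvRowsEntries? rows i).map (fun es => es0 ++ es) := by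
  induction rows with
  | nil => intro i es0; simp [pvRowsEntries?, PySem.List.enumerate_nil]
  | cons col rs ih =>
    intro i es0
    rw [PySem.List.enumerate_cons, List.foldl_cons]
    cases hm : pvCMin? col with
    | none =>
      simp only [hm, pvRowsEntries?]
      induction PySem.List.enumerate rs (i + 1) with
      | nil => rfl
      | cons q t iht => simpa using iht
    | some m =>
      simp only [hm, pvRowsEntries?, ih (i + 1), Option.map_map]
      cases pvRowsEntries? rs (i + 1) <;> simp

-- min? with key (·.2.2) is literally the pvUpd fold
theorem pvMin?_eq_fold (l : List (Int × Int × Int)) :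
    PySem.List.min? l (fun e => e.2.2) = l.foldl pvUpd none := by
  unfold PySem.List.min?
  apply PySem.List.foldl_congr_mem
  intro acc e _
  cases acc <;> rfl

-- ===== VERDICT (by name: the statement is the Claim_ definition above) =====
theorem gather_pair_spec : Claim_equal_gather_pair := by
  intro dm ignore _ _
  unfold Spec_gather_pair gather_pair gather_pair_alt
  have hA := pvFoldA_eq ignore dm 0 none
  simp only [pvEnc] at hA
  rw [hA, pvEntries_eq ignore dm 0 []]
  cases hes : pvRowsEntries? dm 0 with
  | none => rfl
  | some es =>
    simp only [Option.map_some, List.nil_append, pvMin?_eq_fold]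
    cases hb : (es.filter (fun e => !pvIgnored ignore (e.1, e.2.1))).foldl pvUpd none with
    | none => simp
    | some best => simp
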